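-- pv_equiv track=rewrite | github.com/allen246/sync_tool_feature_flag | services/branch_service.py | _parse_db_queries
-- ===== SOURCE A (Python) =====
-- def _parse_db_queries(raw: str) -> dict:
--     """
--     Parse stdout that contains 'Source DB query: ...' and optionally
--     'Destination DB query: ...' blocks. Returns dict with source_query
--     and destination_query keys (empty string if absent).
--     """
--     source_query = ""
--     destination_query = ""
--     lines = raw.splitlines()
--     i = 0
--     while i < len(lines):
--         line = lines[i]
--         if line.startswith("Source DB query:"):
--             block = line[len("Source DB query:"):].strip()
--             i += 1
--             while i < len(lines) and not lines[i].startswith("Destination DB query:") and not lines[i].startswith("Source DB query:"):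
--                 block += "\n" + lines[i]
--                 i += 1
--             source_query = block.strip()
--         elif line.startswith("Destination DB query:"):
--             block = line[len("Destination DB query:"):].strip()
--             i += 1
--             while i < len(lines) and not lines[i].startswith("Source DB query:") and not lines[i].startswith("Destination DB query:"):
--                 block += "\n" + lines[i]
--                 i += 1
--             destination_query = block.strip()
--         else:
--             i += 1
--     return {"source_query": source_query, "destination_query": destination_query}
-- ===== SOURCE B (Python) =====
-- def _parse_db_queries(raw: str) -> dict:
--     """Single flat pass with a state variable instead of nested while-loops."""
--     src_lines = None
--     dst_lines = None
--     current = None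
--     for line in raw.splitlines():
--         if line.startswith("Source DB query:"):
--             current = "source"
--             src_lines = [line[len("Source DB query:"):].strip()]
--         elif line.startswith("Destination DB query:"):
--             current = "dest"
--             dst_lines = [line[len("Destination DB query:"):].strip()]
--         elif current == "source":
--             src_lines.append(line)
--         elif current == "dest":
--             dst_lines.append(line)
--     return {
--         "source_query": "\n".join(src_lines).strip() if src_lines is not None else "",
--         "destination_query": "\n".join(dst_lines).strip() if dst_lines is not None else "",
--     }
-- ===== Notes on version B (the rewrite author's own statement) =====
-- stated objective: simpler
-- what changed: Replaced the index-driven outer loop with nested block-consuming while-loops by one flat for-loop over the lines with a current-block state variable and per-block line accumulators joined at the end.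
import Mathlib
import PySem

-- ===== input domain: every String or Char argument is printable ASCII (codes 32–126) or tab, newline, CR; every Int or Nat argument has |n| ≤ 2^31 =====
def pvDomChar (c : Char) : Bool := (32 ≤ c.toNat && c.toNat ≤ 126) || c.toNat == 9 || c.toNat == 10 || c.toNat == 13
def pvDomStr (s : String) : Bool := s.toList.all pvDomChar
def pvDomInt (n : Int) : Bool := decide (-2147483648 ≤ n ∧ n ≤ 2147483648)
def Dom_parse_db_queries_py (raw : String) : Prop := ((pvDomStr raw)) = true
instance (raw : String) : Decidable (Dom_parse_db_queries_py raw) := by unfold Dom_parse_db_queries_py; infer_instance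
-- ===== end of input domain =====

-- B replaces A's nested block-consuming while-loops by one flat fold with a current-block
-- state variable and per-block line accumulators joined at the end (objective: simpler).

-- ===== PORT A =====
def pvSrcHdr : List Char := "Source DB query:".toList
def pvDstHdr : List Char := "Destination DB query:".toList

-- A's inner while-loop: consume lines into the block until a header line or end of input.
def pvCollectA : List (List Char) → List Char → List Char × List (List Char)
  | [], b => (b, [])
  | l :: ls, b =>
    if PySem.Chars.startswith l pvDstHdr || PySem.Chars.startswith l pvSrcHdr then (b, l :: ls)
    else pvCollectA ls (b ++ '\n' :: l)

-- needed by pvLoopA's termination proof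
theorem pvCollectA_len (ls : List (List Char)) (b : List Char) :
    (pvCollectA ls b).2.length ≤ ls.length := by
  induction ls generalizing b with
  | nil => simp [pvCollectA]
  | cons l ls ih =>
    simp only [pvCollectA]
    split
    · simp
    · exact le_trans (ih _) (by simp)

-- A's outer while-loop over the line index, state = (source_query, destination_query).
def pvLoopA : List (List Char) → List Char → List Char → List Char × List Char
  | [], s, d => (s, d)
  | l :: ls, s, d =>
    if PySem.Chars.startswith l pvSrcHdr then
      let r := pvCollectA ls (PySem.Chars.strip (PySem.Chars.slice l (some 16) none))
      pvLoopA r.2 (PySem.Chars.strip r.1) d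
    else if PySem.Chars.startswith l pvDstHdr then
      let r := pvCollectA ls (PySem.Chars.strip (PySem.Chars.slice l (some 21) none))
      pvLoopA r.2 s (PySem.Chars.strip r.1)
    else pvLoopA ls s d
termination_by ls _ _ => ls.length
decreasing_by
  · exact Nat.lt_succ_of_le (pvCollectA_len _ _)
  · exact Nat.lt_succ_of_le (pvCollectA_len _ _)
  · simp

def parse_db_queries_py (raw : String) : List (String × String) :=
  let lines := PySem.Chars.splitlines raw.toList
  let r := pvLoopA lines [] []
  [("source_query", String.ofList r.1), ("destination_query", String.ofList r.2)]

-- ===== PORT B =====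
-- state = (current, src_lines, dst_lines); None models Python's None
def pvStepB (st : Option Bool × Option (List (List Char)) × Option (List (List Char)))
    (l : List Char) : Option Bool × Option (List (List Char)) × Option (List (List Char)) :=
  if PySem.Chars.startswith l pvSrcHdr then
    (some true, some [PySem.Chars.strip (PySem.Chars.slice l (some 16) none)], st.2.2)
  else if PySem.Chars.startswith l pvDstHdr then
    (some false, st.2.1, some [PySem.Chars.strip (PySem.Chars.slice l (some 21) none)])
  else
    match st.1 with
    | some true => (st.1, (st.2.1).map (fun xs => xs ++ [l]), st.2.2)
    | some false => (st.1, st.2.1, (st.2.2).map (fun xs => xs ++ [l]))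
    | none => st

-- "\n".join(lines).strip() if lines is not None else ""
def pvFin : Option (List (List Char)) → List Char
  | none => []
  | some xs => PySem.Chars.strip (PySem.Chars.join ['\n'] xs)

def parse_db_queries_py_alt (raw : String) : List (String × String) :=
  let st := (PySem.Chars.splitlines raw.toList).foldl pvStepB (none, none, none)
  [("source_query", String.ofList (pvFin st.2.1)), ("destination_query", String.ofList (pvFin st.2.2))]

-- ===== PRECONDITION & SPEC =====
def Spec_parse_db_queries_py (raw : String) (out : List (String × String)) : Prop := out = parse_db_queries_py_alt raw
instance (raw : String) (out : List (String × String)) : Decidable (Spec_parse_db_queries_py raw out) := by unfold Spec_parse_db_queries_py; infer_instance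

-- ===== CLAIM (what is proved, stated in full; the proofs are below) =====
def Claim_equal_parse_db_queries_py : Prop := ∀ (raw : String), Dom_parse_db_queries_py raw → Spec_parse_db_queries_py raw (parse_db_queries_py raw)

-- ===== LEMMAS AND PROOFS =====
theorem pvJoin_append (acc : List (List Char)) (l : List Char) (h : acc ≠ []) :
    PySem.Chars.join ['\n'] (acc ++ [l]) = PySem.Chars.join ['\n'] acc ++ '\n' :: l := by
  induction acc with
  | nil => exact absurd rfl h
  | cons a acc ih =>
    cases acc with
    | nil =>
      rw [List.singleton_append, PySem.Chars.join_cons_cons,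
        PySem.Chars.join_singleton, PySem.Chars.join_singleton]
      simp
    | cons b acc =>
      simp only [List.cons_append, PySem.Chars.join_cons_cons, List.append_assoc,
        List.cons_inj_right, List.append_cancel_left_eq]
      exact ih (by simp)

-- a header line overwrites the whole state, so the previous `current` is irrelevant there
theorem pvStepB_header (c1 c2 : Option Bool) (so dO : Option (List (List Char))) (l : List Char)
    (h : (PySem.Chars.startswith l pvSrcHdr || PySem.Chars.startswith l pvDstHdr) = true) :
    pvStepB (c1, so, dO) l = pvStepB (c2, so, dO) l := by
  by_cases hsp : PySem.Chars.startswith l pvSrcHdr = true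
  · simp [pvStepB, hsp]
  · by_cases hdp : PySem.Chars.startswith l pvDstHdr = true
    · simp [pvStepB, hsp, hdp]
    · exfalso
      rcases Bool.or_eq_true_iff.mp h with h1 | h1
      · exact hsp h1
      · exact hdp h1

-- the inner loop stops only at end of input or at a header line
theorem pvCollectA_boundary (ls : List (List Char)) (b : List Char) :
    (pvCollectA ls b).2 = [] ∨
      ∃ h t, (pvCollectA ls b).2 = h :: t ∧
        (PySem.Chars.startswith h pvSrcHdr || PySem.Chars.startswith h pvDstHdr) = true := by
  induction ls generalizing b with
  | nil => left; simp [pvCollectA]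
  | cons l ls ih =>
    simp only [pvCollectA]
    split
    · rename_i hcond
      right; exact ⟨l, ls, rfl, by rwa [Bool.or_comm]⟩
    · exact ih _

-- B's fold, while `current` points at a block, simulates A's inner loop (source side)
theorem pvFold_collect_src (ls : List (List Char)) :
    ∀ (acc : List (List Char)) (dO : Option (List (List Char))), acc ≠ [] →
    ∃ acc', acc' ≠ [] ∧
      PySem.Chars.join ['\n'] acc' = (pvCollectA ls (PySem.Chars.join ['\n'] acc)).1 ∧
      ls.foldl pvStepB (some true, some acc, dO) =
        (pvCollectA ls (PySem.Chars.join ['\n'] acc)).2.foldl pvStepB (some true, some acc', dO) := by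
  induction ls with
  | nil => intro acc dO h; exact ⟨acc, h, by simp [pvCollectA], by simp [pvCollectA]⟩
  | cons l ls ih =>
    intro acc dO h
    by_cases hs : PySem.Chars.startswith l pvSrcHdr = true
    · exact ⟨acc, h, by simp [pvCollectA, hs], by simp [pvCollectA, hs]⟩
    · by_cases hd : PySem.Chars.startswith l pvDstHdr = true
      · exact ⟨acc, h, by simp [pvCollectA, hd], by simp [pvCollectA, hd]⟩
      · have hstep : pvStepB (some true, some acc, dO) l = (some true, some (acc ++ [l]), dO) := by
          simp [pvStepB, hs, hd]
        have hcoll : pvCollectA (l :: ls) (PySem.Chars.join ['\n'] acc)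
            = pvCollectA ls (PySem.Chars.join ['\n'] (acc ++ [l])) := by
          simp [pvCollectA, hs, hd, pvJoin_append acc l h]
        rcases ih (acc ++ [l]) dO (by simp) with ⟨acc', h1, h2, h3⟩
        exact ⟨acc', h1, by rw [hcoll]; exact h2, by
          rw [List.foldl_cons, hstep, hcoll]; exact h3⟩

-- the same, destination side
theorem pvFold_collect_dst (ls : List (List Char)) :
    ∀ (acc : List (List Char)) (sO : Option (List (List Char))), acc ≠ [] →
    ∃ acc', acc' ≠ [] ∧
      PySem.Chars.join ['\n'] acc' = (pvCollectA ls (PySem.Chars.join ['\n'] acc)).1 ∧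
      ls.foldl pvStepB (some false, sO, some acc) =
        (pvCollectA ls (PySem.Chars.join ['\n'] acc)).2.foldl pvStepB (some false, sO, some acc') := by
  induction ls with
  | nil => intro acc sO h; exact ⟨acc, h, by simp [pvCollectA], by simp [pvCollectA]⟩
  | cons l ls ih =>
    intro acc sO h
    by_cases hs : PySem.Chars.startswith l pvSrcHdr = true
    · exact ⟨acc, h, by simp [pvCollectA, hs], by simp [pvCollectA, hs]⟩
    · by_cases hd : PySem.Chars.startswith l pvDstHdr = true
      · exact ⟨acc, h, by simp [pvCollectA, hd], by simp [pvCollectA, hd]⟩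
      · have hstep : pvStepB (some false, sO, some acc) l = (some false, sO, some (acc ++ [l])) := by
          simp [pvStepB, hs, hd]
        have hcoll : pvCollectA (l :: ls) (PySem.Chars.join ['\n'] acc)
            = pvCollectA ls (PySem.Chars.join ['\n'] (acc ++ [l])) := by
          simp [pvCollectA, hs, hd, pvJoin_append acc l h]
        rcases ih (acc ++ [l]) sO (by simp) with ⟨acc', h1, h2, h3⟩
        exact ⟨acc', h1, by rw [hcoll]; exact h2, by
          rw [List.foldl_cons, hstep, hcoll]; exact h3⟩

theorem pvMain : ∀ (n : Nat) (ls : List (List Char)), ls.length ≤ n →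
    ∀ (sO dO : Option (List (List Char))),
    pvLoopA ls (pvFin sO) (pvFin dO) =
      (pvFin ((ls.foldl pvStepB (none, sO, dO)).2.1),
       pvFin ((ls.foldl pvStepB (none, sO, dO)).2.2)) := by
  intro n
  induction n with
  | zero =>
    intro ls hl sO dO
    have : ls = [] := List.eq_nil_of_length_eq_zero (Nat.le_zero.mp hl)
    subst this; simp [pvLoopA]
  | succ n ih =>
    intro ls hl sO dO
    cases ls with
    | nil => simp [pvLoopA]
    | cons l ls =>
      have hls : ls.length ≤ n := Nat.lt_succ_iff.mp (by simpa using hl)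
      by_cases hs : PySem.Chars.startswith l pvSrcHdr = true
      · -- source header
        set b0 := PySem.Chars.strip (PySem.Chars.slice l (some 16) none) with hb0
        have hstep : pvStepB (none, sO, dO) l = (some true, some [b0], dO) := by
          simp [pvStepB, hs, hb0]
        rcases pvFold_collect_src ls [b0] dO (by simp) with ⟨acc', hne, hjoin, hfold⟩
        rw [PySem.Chars.join_singleton] at hjoin hfold
        set r := pvCollectA ls b0 with hr
        have hA : pvLoopA (l :: ls) (pvFin sO) (pvFin dO)
            = pvLoopA r.2 (PySem.Chars.strip r.1) (pvFin dO) := by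
          rw [pvLoopA]; simp [hs, hb0, hr]
        have hfin : pvFin (some acc') = PySem.Chars.strip r.1 := by
          simp [pvFin, hjoin]
        have hB : (l :: ls).foldl pvStepB (none, sO, dO)
            = r.2.foldl pvStepB (some true, some acc', dO) := by
          rw [List.foldl_cons, hstep]; exact hfold
        rcases pvCollectA_boundary ls b0 with hbd | ⟨h, t, hbd, hh⟩
        · rw [hA, ← hr] at *
          rw [hbd] at hB ⊢
          rw [hB]
          simp [pvLoopA, hfin]
        · rw [hA, hB, ← hr] at *
          rw [hbd]
          have : (h :: t).foldl pvStepB (some true, some acc', dO)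
              = (h :: t).foldl pvStepB (none, some acc', dO) := by
            rw [List.foldl_cons, List.foldl_cons, pvStepB_header (some true) none _ _ _ hh]
          rw [hbd] at hB
          rw [hB, this, ← hfin]
          exact ih (h :: t) (by rw [← hbd]; exact le_trans (pvCollectA_len ls b0) hls) _ _
      · by_cases hd : PySem.Chars.startswith l pvDstHdr = true
        · -- destination header
          set b0 := PySem.Chars.strip (PySem.Chars.slice l (some 21) none) with hb0
          have hstep : pvStepB (none, sO, dO) l = (some false, sO, some [b0]) := by
            simp [pvStepB, hs, hd, hb0]
          rcases pvFold_collect_dst ls [b0] sO (by simp) with ⟨acc', hne, hjoin, hfold⟩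
          rw [PySem.Chars.join_singleton] at hjoin hfold
          set r := pvCollectA ls b0 with hr
          have hA : pvLoopA (l :: ls) (pvFin sO) (pvFin dO)
              = pvLoopA r.2 (pvFin sO) (PySem.Chars.strip r.1) := by
            rw [pvLoopA]; simp [hs, hd, hb0, hr]
          have hfin : pvFin (some acc') = PySem.Chars.strip r.1 := by
            simp [pvFin, hjoin]
          have hB : (l :: ls).foldl pvStepB (none, sO, dO)
              = r.2.foldl pvStepB (some false, sO, some acc') := by
            rw [List.foldl_cons, hstep]; exact hfold
          rcases pvCollectA_boundary ls b0 with hbd | ⟨h, t, hbd, hh⟩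
          · rw [hA, ← hr] at *
            rw [hbd] at hB ⊢
            rw [hB]
            simp [pvLoopA, hfin]
          · rw [hA, hB, ← hr] at *
            rw [hbd]
            have : (h :: t).foldl pvStepB (some false, sO, some acc')
                = (h :: t).foldl pvStepB (none, sO, some acc') := by
              rw [List.foldl_cons, List.foldl_cons, pvStepB_header (some false) none _ _ _ hh]
            rw [hbd] at hB
            rw [hB, this, ← hfin]
            exact ih (h :: t) (by rw [← hbd]; exact le_trans (pvCollectA_len ls b0) hls) _ _
        · -- ordinary line before any header: both sides skip it
          have hstep : pvStepB (none, sO, dO) l = (none, sO, dO) := by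
            simp [pvStepB, hs, hd]
          rw [List.foldl_cons, hstep, pvLoopA]
          simp only [hs, hd]
          exact ih ls hls sO dO

-- ===== VERDICT (by name: the statement is the Claim_ definition above) =====
theorem parse_db_queries_py_spec : Claim_equal_parse_db_queries_py := by
  intro raw _
  have h0 : pvFin none = [] := rfl
  have h := pvMain (PySem.Chars.splitlines raw.toList).length
    (PySem.Chars.splitlines raw.toList) le_rfl none none
  rw [h0] at h
  unfold Spec_parse_db_queries_py
  simp only [parse_db_queries_py, parse_db_queries_py_alt, h]
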